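-- pv_equiv track=rewrite | github.com/JavierOrdonez2001/inacap_content | code/index.py | imparParOrder
-- ===== SOURCE A (Python) =====
-- def imparParOrder(lista:list):
--     listaOrdenada = []
--
--     for numero in lista:
--         if numero % 2 == 0:
--             listaOrdenada.insert(0,numero)
--         if numero % 2 == 1:
--             listaOrdenada.insert(len(lista),numero)
--
--     return f'lista ordenada de par hasta impar: {listaOrdenada}'
-- ===== SOURCE B (Python) =====
-- def imparParOrder(lista: list):
--     evens = [n for n in lista if n % 2 == 0]
--     odds = [n for n in lista if n % 2 == 1]
--     listaOrdenada = evens[::-1] + odds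
--     return f'lista ordenada de par hasta impar: {listaOrdenada}'
-- ===== Notes on version B (the rewrite author's own statement) =====
-- stated objective: simpler
-- what changed: Replaced A's single interleaved loop doing positional inserts (front for evens, end for odds) with two independent parity-filter comprehensions, a slice-reverse and one concatenation.
import Mathlib
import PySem

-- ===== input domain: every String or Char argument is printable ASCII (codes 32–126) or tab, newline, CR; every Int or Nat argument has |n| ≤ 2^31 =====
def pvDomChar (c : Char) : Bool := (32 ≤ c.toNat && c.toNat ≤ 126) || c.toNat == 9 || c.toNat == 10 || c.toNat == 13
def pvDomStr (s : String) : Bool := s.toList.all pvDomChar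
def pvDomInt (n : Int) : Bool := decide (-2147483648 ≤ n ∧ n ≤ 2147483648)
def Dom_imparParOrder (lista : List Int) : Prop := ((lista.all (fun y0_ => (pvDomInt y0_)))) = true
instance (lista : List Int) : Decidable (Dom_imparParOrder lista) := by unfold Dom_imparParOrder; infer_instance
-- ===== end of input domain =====

-- B replaces A's interleaved positional-insert loop by two parity filters, a reverse and one
-- concatenation; objective: simpler.

-- shared helper: Python's repr of a list of ints, as interpolated by the f-string
def pyReprIntList (xs : List Int) : String :=
  "[" ++ PySem.Str.join ", " (xs.map PySem.Int.toStr) ++ "]"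

-- ===== PORT A =====
def imparParOrder (lista : List Int) : String :=
  let listaOrdenada := lista.foldl (fun acc numero =>
    let acc1 := if PySem.Int.mod numero 2 == 0 then PySem.List.insert acc 0 numero else acc
    if PySem.Int.mod numero 2 == 1 then PySem.List.insert acc1 (lista.length : Int) numero else acc1) []
  "lista ordenada de par hasta impar: " ++ pyReprIntList listaOrdenada

-- ===== PORT B =====
def imparParOrder_alt (lista : List Int) : String :=
  let evens := lista.filter (fun n => PySem.Int.mod n 2 == 0)
  let odds := lista.filter (fun n => PySem.Int.mod n 2 == 1)
  let listaOrdenada := evens.reverse ++ odds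
  "lista ordenada de par hasta impar: " ++ pyReprIntList listaOrdenada

-- ===== PRECONDITION & SPEC =====
def Spec_imparParOrder (lista : List Int) (out : String) : Prop := out = imparParOrder_alt lista
instance (lista : List Int) (out : String) : Decidable (Spec_imparParOrder lista out) := by unfold Spec_imparParOrder; infer_instance

-- ===== CLAIM (what is proved, stated in full; the proofs are below) =====
def Claim_equal_imparParOrder : Prop := ∀ (lista : List Int), Dom_imparParOrder lista → Spec_imparParOrder lista (imparParOrder lista)

-- ===== LEMMAS AND PROOFS =====

-- Python's n % 2 is Lean's emod for the positive divisor 2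
lemma pymod_two (n : Int) : PySem.Int.mod n 2 = n % 2 := by
  have h := @Int.fmod_eq_emod n 2
  simp [PySem.Int.mod] at h ⊢; omega

-- list.insert at an index ≥ the length appends (Python clamps)
lemma insert_ge_length (xs : List Int) (n : Nat) (v : Int) (h : xs.length ≤ n) :
    PySem.List.insert xs (n : Int) v = xs ++ [v] := by
  have h1 : (if (n:Int) < 0 then max ((n:Int) + ↑xs.length) 0 else min ↑n ↑xs.length)
      = (xs.length : Int) := by split <;> omega
  simp [PySem.List.insert, PySem.List.sliceIndices, h1]

-- invariant of A's loop: the accumulator is (evens so far).reverse ++ (odds so far)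
lemma loop_eq (N : Nat) : ∀ (l E O : List Int),
    E.length + O.length + l.length ≤ N →
    l.foldl (fun acc numero =>
        let acc1 := if PySem.Int.mod numero 2 == 0 then PySem.List.insert acc 0 numero else acc
        if PySem.Int.mod numero 2 == 1 then PySem.List.insert acc1 (N : Int) numero else acc1)
      (E.reverse ++ O)
    = (E ++ l.filter (fun n => PySem.Int.mod n 2 == 0)).reverse
      ++ (O ++ l.filter (fun n => PySem.Int.mod n 2 == 1)) := by
  intro l
  induction l with
  | nil => intro E O _; simp
  | cons x t ih =>
    intro E O hlen
    have hx := pymod_two x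
    simp only [List.foldl_cons, List.filter_cons]
    by_cases hev : PySem.Int.mod x 2 = 0
    · have hod : ¬ PySem.Int.mod x 2 = 1 := by omega
      have step : (let acc1 := if PySem.Int.mod x 2 == 0 then PySem.List.insert (E.reverse ++ O) 0 x else E.reverse ++ O
          if PySem.Int.mod x 2 == 1 then PySem.List.insert acc1 (N : Int) x else acc1)
          = (E ++ [x]).reverse ++ O := by
        rw [show (PySem.Int.mod x 2 == 0) = true by simp; omega,
            show (PySem.Int.mod x 2 == 1) = false by simp; omega]
        simp [PySem.List.insert_zero]
      rw [step, ih (E ++ [x]) O (by simp at hlen ⊢; omega),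
          show (PySem.Int.mod x 2 == 0) = true by simp; omega,
          show (PySem.Int.mod x 2 == 1) = false by simp; omega]
      simp
    · have hod : PySem.Int.mod x 2 = 1 := by
        have h1 : x % 2 = 0 ∨ x % 2 = 1 := by omega
        omega
      have step : (let acc1 := if PySem.Int.mod x 2 == 0 then PySem.List.insert (E.reverse ++ O) 0 x else E.reverse ++ O
          if PySem.Int.mod x 2 == 1 then PySem.List.insert acc1 (N : Int) x else acc1)
          = E.reverse ++ (O ++ [x]) := by
        have hlen2 : (E.reverse ++ O).length ≤ N := by simp at hlen ⊢; omega
        rw [show (PySem.Int.mod x 2 == 0) = false by simp; omega,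
            show (PySem.Int.mod x 2 == 1) = true by simp; omega]
        simp [insert_ge_length _ _ _ hlen2]
      rw [step, ih E (O ++ [x]) (by simp at hlen ⊢; omega),
          show (PySem.Int.mod x 2 == 0) = false by simp; omega,
          show (PySem.Int.mod x 2 == 1) = true by simp; omega]
      simp

-- ===== VERDICT (by name: the statement is the Claim_ definition above) =====
theorem imparParOrder_spec : Claim_equal_imparParOrder := by
  intro lista _
  unfold Spec_imparParOrder imparParOrder imparParOrder_alt
  have h := loop_eq lista.length lista [] [] (by simp)
  simp only [List.reverse_nil, List.nil_append, List.append_nil] at h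
  rw [h]
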